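-- pv_equiv track=rewrite | github.com/boldty/Advent-of-Code-2019 | dec4/B/script.py | checkIfTrue
-- ===== SOURCE A (Python) =====
-- def checkIfTrue(val):
--     val = [int(d) for d in str(val)]
--     sameTwo = set()
--     sameMore = set()
--     d0 = 0
--     d1 = 0
--     d2 = 0
--     for i in range(len(val)-2):
--         d0 = val[i]
--         d1 = val[i+1]
--         d2 = val[i+2]
--         s = set()
--         if d0 > d1 or d1 > d2:
--             return False
--         elif d0 == d1:
--             sameTwo.add(d0)
--         elif d1 == d2:
--             sameTwo.add(d1)
--         if d0 == d1 and d1 == d2: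
--             sameMore.add(d0)
--     return False if len((sameTwo^sameMore)) == 0 else True
-- ===== SOURCE B (Python) =====
-- def checkIfTrue(val):
--     digits = [int(d) for d in str(val)]
--     if len(digits) < 3:
--         return False
--     if any(a > b for a, b in zip(digits, digits[1:])):
--         return False
--     run = 1
--     for a, b in zip(digits, digits[1:]):
--         if a == b:
--             run += 1
--         else:
--             if run == 2:
--                 return True
--             run = 1
--     return run == 2
-- ===== Notes on version B (the rewrite author's own statement) =====
-- stated objective: simpler
-- what changed: A scans 3-digit windows accumulating two sets (digits with an adjacent pair / with a triple) and finally tests their symmetric difference; B checks monotonicity with one pairwise pass and then tracks a single run-length counter, returning True as soon as a run of length exactly 2 closes.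
import Mathlib
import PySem

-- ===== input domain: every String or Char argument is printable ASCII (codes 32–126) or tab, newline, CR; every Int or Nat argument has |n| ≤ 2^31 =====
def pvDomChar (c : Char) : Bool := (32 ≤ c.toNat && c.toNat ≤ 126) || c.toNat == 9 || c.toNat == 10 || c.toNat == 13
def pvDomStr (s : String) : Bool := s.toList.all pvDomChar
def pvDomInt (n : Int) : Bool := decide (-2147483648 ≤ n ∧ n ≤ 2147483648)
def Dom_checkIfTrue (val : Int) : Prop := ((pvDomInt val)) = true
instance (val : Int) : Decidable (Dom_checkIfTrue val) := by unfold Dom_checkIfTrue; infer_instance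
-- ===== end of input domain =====

-- B replaces A's two digit-sets and symmetric-difference test by a single run-length counter (objective: simpler).

-- ===== PORT A =====
-- shared by both ports: [int(d) for d in str(val)]  (int(c) = PySem.Int.ofStr?; none = ValueError)
def pyDigits (val : Int) : Option (List Int) :=
  (PySem.Int.toChars val).mapM (fun c => PySem.Int.ofStr? (String.mk [c]))

-- A's loop 'for i in range(len(val)-2)' reading val[i],val[i+1],val[i+2]: the obvious
-- structural recursion over the same window and the same two sets, with the early 'return False'.
def checkIfTrueLoop : List Int → PySem.Set Int → PySem.Set Int → Bool
  | d0 :: d1 :: d2 :: rest, sameTwo, sameMore =>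
      if d0 > d1 || d1 > d2 then false
      else
        checkIfTrueLoop (d1 :: d2 :: rest)
          (if d0 == d1 then PySem.Set.add sameTwo d0
           else if d1 == d2 then PySem.Set.add sameTwo d1 else sameTwo)
          (if d0 == d1 && d1 == d2 then PySem.Set.add sameMore d0 else sameMore)
  | _, sameTwo, sameMore =>
      -- return False if len((sameTwo^sameMore)) == 0 else True
      if PySem.Set.len (PySem.Set.symmDiff sameTwo sameMore) == 0 then false else true

def checkIfTrue (val : Int) : Bool :=
  match pyDigits val with
  | none => false    -- int(d) raises ValueError (val < 0): excluded by Pre_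
  | some ds => checkIfTrueLoop ds PySem.Set.empty PySem.Set.empty

-- ===== PORT B =====
-- the run loop 'for a, b in zip(digits, digits[1:])' with its early 'return True'
def runScan : Nat → List (Int × Int) → Bool
  | run, [] => run == 2
  | run, (a, b) :: rest =>
      if a == b then runScan (run + 1) rest
      else if run == 2 then true
      else runScan 1 rest

def checkIfTrue_alt (val : Int) : Bool :=
  match pyDigits val with
  | none => false    -- same ValueError as A: excluded by Pre_
  | some ds =>
      if ds.length < 3 then false
      else if (ds.zip ds.tail).any (fun p => decide (p.1 > p.2)) then false
      else runScan 1 (ds.zip ds.tail)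

-- ===== PRECONDITION & SPEC =====
-- Pre_ excludes val < 0, where str(val) contains '-' and int('-') raises ValueError in both A and B.
def Pre_checkIfTrue (val : Int) : Prop := 0 ≤ val
instance (val : Int) : Decidable (Pre_checkIfTrue val) := by unfold Pre_checkIfTrue; infer_instance
def pvWitness_checkIfTrue : Int := (112233)

def Spec_checkIfTrue (val : Int) (out : Bool) : Prop := out = checkIfTrue_alt val
instance (val : Int) (out : Bool) : Decidable (Spec_checkIfTrue val out) := by unfold Spec_checkIfTrue; infer_instance

-- ===== CLAIM (what is proved, stated in full; the proofs are below) =====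
def Claim_equal_checkIfTrue : Prop := ∀ (val : Int), Dom_checkIfTrue val → Pre_checkIfTrue val → Spec_checkIfTrue val (checkIfTrue val)

-- ===== LEMMAS AND PROOFS =====

-- B's monotonicity pre-pass, as a chain
lemma anyDec_false_iff (ds : List Int) :
    ((ds.zip ds.tail).any (fun p => decide (p.1 > p.2)) = false) ↔ List.IsChain (· ≤ ·) ds := by
  induction ds with
  | nil => simp
  | cons a t ih =>
    cases t with
    | nil => simp
    | cons b r =>
      simp only [List.tail_cons, List.zip_cons_cons, List.any_cons, Bool.or_eq_false_iff,
        decide_eq_false_iff_not, not_lt, List.isChain_cons_cons] at *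
      exact and_congr_right fun _ => ih

-- A returns False as soon as some window is not nondecreasing
lemma loop_false_of_bad : ∀ (rest : List Int) (d0 d1 d2 : Int) (S2 SM : PySem.Set Int),
    ¬ List.IsChain (· ≤ ·) (d0 :: d1 :: d2 :: rest) →
    checkIfTrueLoop (d0 :: d1 :: d2 :: rest) S2 SM = false := by
  intro rest
  induction rest with
  | nil =>
    intro d0 d1 d2 S2 SM h
    simp only [List.isChain_cons_cons, List.IsChain.singleton, and_true, not_and_or, not_le] at h
    have hc : (decide (d0 > d1) || decide (d1 > d2)) = true := by
      rcases h with h | h <;> simp [h]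
    simp [checkIfTrueLoop, hc]
  | cons d3 r ih =>
    intro d0 d1 d2 S2 SM h
    by_cases hb : (decide (d0 > d1) || decide (d1 > d2)) = true
    · simp [checkIfTrueLoop, hb]
    · simp only [Bool.or_eq_true, decide_eq_true_eq, not_or, not_lt, gt_iff_lt] at hb
      have h' : ¬ List.IsChain (· ≤ ·) (d1 :: d2 :: d3 :: r) := by
        intro hc; exact h (List.isChain_cons_cons.mpr ⟨hb.1, hc⟩)
      have hc : (decide (d0 > d1) || decide (d1 > d2)) = false := by
        simp [not_lt.mpr hb.1, not_lt.mpr hb.2]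
      simp only [checkIfTrueLoop, hc, Bool.false_eq_true, if_false]
      exact ih d1 d2 d3 _ _ h'

-- the final 'len(sameTwo ^ sameMore) == 0' test, by membership (sameMore ⊆ sameTwo throughout)
lemma final_eq (S2 SM : PySem.Set Int) (hsub : ∀ x ∈ SM, x ∈ S2) :
    (if PySem.Set.len (PySem.Set.symmDiff S2 SM) == 0 then false else true)
      = decide (∃ x ∈ S2, x ∉ SM) := by
  by_cases h : ∃ x ∈ S2, x ∉ SM
  · obtain ⟨x, hx1, hx2⟩ := h
    have hm : x ∈ PySem.Set.symmDiff S2 SM := by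
      rw [PySem.Set.mem_symmDiff]; exact Or.inl ⟨hx1, hx2⟩
    have hne : (PySem.Set.symmDiff S2 SM).length ≠ 0 := by
      intro h0
      rw [List.length_eq_zero_iff] at h0
      rw [h0] at hm
      exact List.not_mem_nil hm
    have hx : ∃ x ∈ S2, x ∉ SM := ⟨x, hx1, hx2⟩
    simp [PySem.Set.len, hne, hx]
  · have hnil : PySem.Set.symmDiff S2 SM = [] := by
      rcases List.eq_nil_or_concat (PySem.Set.symmDiff S2 SM) with hnil | ⟨l, y, hy⟩
      · exact hnil
      · exfalso
        have hm : y ∈ PySem.Set.symmDiff S2 SM := by rw [hy]; simp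
        rw [PySem.Set.mem_symmDiff] at hm
        rcases hm with ⟨h1, h2⟩ | ⟨h1, h2⟩
        · exact h ⟨y, h1, h2⟩
        · exact h2 (hsub y h1)
    simp [hnil, PySem.Set.len, h]

-- once some x with a pair but no triple is strictly below every remaining digit, A ends up True
lemma escape : ∀ (rest : List Int) (d0 d1 x : Int) (S2 SM : PySem.Set Int),
    List.IsChain (· ≤ ·) (d0 :: d1 :: rest) → x ∈ S2 → x ∉ SM → x < d0 →
    checkIfTrueLoop (d0 :: d1 :: rest) S2 SM = true := by
  intro rest
  induction rest with
  | nil =>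
    intro d0 d1 x S2 SM _ hx hxn _
    have hm : x ∈ PySem.Set.symmDiff S2 SM := by
      rw [PySem.Set.mem_symmDiff]; exact Or.inl ⟨hx, hxn⟩
    have hne : (PySem.Set.symmDiff S2 SM).length ≠ 0 := by
      intro h0
      rw [List.length_eq_zero_iff] at h0
      rw [h0] at hm
      exact List.not_mem_nil hm
    simp [checkIfTrueLoop, PySem.Set.len, hne]
  | cons d2 r ih =>
    intro d0 d1 x S2 SM hch hx hxn hlt
    rw [List.isChain_cons_cons] at hch
    obtain ⟨h01, hch⟩ := hch
    have h12 : d1 ≤ d2 := (List.isChain_cons_cons.mp hch).1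
    have hc : (decide (d0 > d1) || decide (d1 > d2)) = false := by
      simp [not_lt.mpr h01, not_lt.mpr h12]
    simp only [checkIfTrueLoop, hc, Bool.false_eq_true, if_false]
    apply ih d1 d2 x
    · exact hch
    · split <;> try split
      all_goals first
        | exact (PySem.Set.mem_add _ _ _).mpr (Or.inl hx)
        | exact hx
    · split
      · rw [PySem.Set.mem_add]
        rintro (hm | hm)
        · exact hxn hm
        · omega
      · exact hxn
    · omega

-- single-step unfoldings of B's run loop
lemma runScan_cons (run : Nat) (a b : Int) (rest : List (Int × Int)) :
    runScan run ((a, b) :: rest)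
      = if a = b then runScan (run + 1) rest
        else if run = 2 then true else runScan 1 rest := by
  conv_lhs => rw [runScan]
  simp only [beq_iff_eq]

lemma runScan_nil (run : Nat) : runScan run [] = decide (run = 2) := by
  conv_lhs => rw [runScan]
  cases h : decide (run = 2) with
  | true => simp_all
  | false => simp_all

-- the decisive invariant: A's loop state (the two sets) versus B's run counter
lemma main_lemma : ∀ (rest : List Int) (d0 d1 : Int) (S2 SM : PySem.Set Int) (run : Nat),
    1 ≤ run →
    List.IsChain (· ≤ ·) (d0 :: d1 :: rest) →
    (∀ x ∈ SM, x ∈ S2) →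
    (∀ x ∈ S2, x ≤ d0) →
    (∀ x ∈ S2, x < d0 → x ∈ SM) →
    (2 ≤ run → d0 ∈ S2) →
    (d0 ∈ S2 → 2 ≤ run ∨ d0 = d1) →
    (3 ≤ run → d0 ∈ SM) →
    (d0 ∈ SM → 3 ≤ run ∨ (2 ≤ run ∧ d0 = d1)) →
    (2 ≤ run → d0 = d1 → d0 ∈ SM) →
    (d0 = d1 → d0 ∈ S2) →
    checkIfTrueLoop (d0 :: d1 :: rest) S2 SM = runScan run ((d0, d1) :: (d1 :: rest).zip rest) := by
  intro rest
  induction rest with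
  | nil =>
    intro d0 d1 S2 SM run h1 _ hA1 hA2 hA3 hA4 hA5 hA6 hA7 hA8 hA9
    have hbase : checkIfTrueLoop [d0, d1] S2 SM = decide (∃ x ∈ S2, x ∉ SM) := by
      rw [← final_eq S2 SM hA1]; rfl
    rw [hbase, runScan_cons]
    simp only [List.zip_nil_right]
    by_cases hd : d0 = d1
    · rw [if_pos hd, runScan_nil]
      by_cases hr : run = 1
      · have hin : d0 ∈ S2 := hA9 hd
        have hout : d0 ∉ SM := by intro hm; rcases hA7 hm with h | ⟨h, _⟩ <;> omega
        have hex : ∃ x ∈ S2, x ∉ SM := ⟨d0, hin, hout⟩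
        have hr1 : run + 1 = 2 := by omega
        simp [hex, hr1]
      · have hr2 : 2 ≤ run := by omega
        have hnex : ¬ ∃ x ∈ S2, x ∉ SM := by
          rintro ⟨x, hx, hxn⟩
          have hle := hA2 x hx
          rcases lt_or_eq_of_le hle with hlt | heq
          · exact hxn (hA3 x hx hlt)
          · exact hxn (heq ▸ hA8 hr2 hd)
        have hne2 : run + 1 ≠ 2 := by omega
        simp [hnex, hne2]
    · rw [if_neg hd]
      by_cases hr : run = 2
      · rw [if_pos hr]
        have hin : d0 ∈ S2 := hA4 (by omega)
        have hout : d0 ∉ SM := by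
          intro hm; rcases hA7 hm with h | ⟨_, h⟩ <;> omega
        have hex : ∃ x ∈ S2, x ∉ SM := ⟨d0, hin, hout⟩
        simp [hex]
      · rw [if_neg hr, runScan_nil]
        have hnex : ¬ ∃ x ∈ S2, x ∉ SM := by
          rintro ⟨x, hx, hxn⟩
          have hle := hA2 x hx
          rcases lt_or_eq_of_le hle with hlt | heq
          · exact hxn (hA3 x hx hlt)
          · subst heq
            rcases hA5 hx with h2 | h2
            · exact hxn (hA6 (by omega))
            · exact hd h2
        simp [hnex]
  | cons d2 r ih =>
    intro d0 d1 S2 SM run h1 hch hA1 hA2 hA3 hA4 hA5 hA6 hA7 hA8 hA9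
    rw [List.isChain_cons_cons] at hch
    obtain ⟨h01, hch'⟩ := hch
    have h12 : d1 ≤ d2 := (List.isChain_cons_cons.mp hch').1
    have hc : (decide (d0 > d1) || decide (d1 > d2)) = false := by
      simp [not_lt.mpr h01, not_lt.mpr h12]
    simp only [checkIfTrueLoop, hc, Bool.false_eq_true, if_false, List.zip_cons_cons]
    rw [runScan_cons]
    by_cases hd : d0 = d1
    · have hbeq : (d0 == d1) = true := by simp [hd]
      rw [if_pos hd]
      simp only [hbeq, Bool.true_and, if_true]
      by_cases hbc : d1 = d2
      · have hbcq : (d1 == d2) = true := by simp [hbc]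
        simp only [hbcq, if_true]
        apply ih d1 d2 _ _ (run + 1) (by omega) hch'
        · intro x hx
          rw [PySem.Set.mem_add] at hx ⊢
          rcases hx with hx | hx
          · exact Or.inl (hA1 x hx)
          · exact Or.inr hx
        · intro x hx
          rw [PySem.Set.mem_add] at hx
          rcases hx with hx | hx
          · exact le_trans (hA2 x hx) (le_of_eq hd)
          · omega
        · intro x hx hlt
          rw [PySem.Set.mem_add] at hx
          rw [PySem.Set.mem_add]
          rcases hx with hx | hx
          · exact Or.inl (hA3 x hx (by omega))
          · omega
        · intro _
          rw [PySem.Set.mem_add]; right; omega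
        · intro _; left; omega
        · intro _
          rw [PySem.Set.mem_add]; left
          exact hd ▸ hA8 (by omega) hd
        · intro _
          right; exact ⟨by omega, hbc⟩
        · intro _ _
          rw [PySem.Set.mem_add]; right; omega
        · intro _
          rw [PySem.Set.mem_add]; right; omega
      · have hbcq : (d1 == d2) = false := by simp [hbc]
        simp only [hbcq, Bool.false_eq_true, if_false]
        apply ih d1 d2 _ _ (run + 1) (by omega) hch'
        · intro x hx
          rw [PySem.Set.mem_add]
          exact Or.inl (hA1 x hx)
        · intro x hx
          rw [PySem.Set.mem_add] at hx
          rcases hx with hx | hx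
          · exact le_trans (hA2 x hx) (le_of_eq hd)
          · omega
        · intro x hx hlt
          rw [PySem.Set.mem_add] at hx
          rcases hx with hx | hx
          · exact hA3 x hx (by omega)
          · omega
        · intro _
          rw [PySem.Set.mem_add]; right; omega
        · intro _; left; omega
        · intro _
          exact hd ▸ hA8 (by omega) hd
        · intro hm
          rcases hA7 (by rw [hd]; exact hm : d0 ∈ SM) with h | ⟨h, _⟩ <;> (left; omega)
        · intro _ h; exact absurd h hbc
        · intro h; exact absurd h hbc
    · have hlt01 : d0 < d1 := lt_of_le_of_ne h01 hd
      have hbeq : (d0 == d1) = false := by simp [hd]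
      rw [if_neg hd]
      simp only [hbeq, Bool.false_and, Bool.false_eq_true, if_false]
      by_cases hr : run = 2
      · rw [if_pos hr]
        have hin : d0 ∈ S2 := hA4 (by omega)
        have hout : d0 ∉ SM := by
          intro hm; rcases hA7 hm with h | ⟨_, h⟩ <;> omega
        apply escape r d1 d2 d0
        · exact hch'
        · split
          · exact (PySem.Set.mem_add _ _ _).mpr (Or.inl hin)
          · exact hin
        · exact hout
        · exact hlt01
      · rw [if_neg hr]
        apply ih d1 d2 _ _ 1 (by omega) hch'
        · intro x hx
          split
          · exact (PySem.Set.mem_add _ _ _).mpr (Or.inl (hA1 x hx))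
          · exact hA1 x hx
        · intro x hx
          by_cases hbc : d1 = d2
          · have hq : (d1 == d2) = true := by simp [hbc]
            simp only [hq, if_true] at hx
            rw [PySem.Set.mem_add] at hx
            rcases hx with hx | hx
            · exact le_trans (hA2 x hx) (le_of_lt hlt01)
            · omega
          · have hq : (d1 == d2) = false := by simp [hbc]
            simp only [hq, Bool.false_eq_true, if_false] at hx
            exact le_trans (hA2 x hx) (le_of_lt hlt01)
        · intro x hx hxlt
          have hx2 : x ∈ S2 := by
            by_cases hbc : d1 = d2
            · have hq : (d1 == d2) = true := by simp [hbc]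
              simp only [hq, if_true] at hx
              rw [PySem.Set.mem_add] at hx
              rcases hx with hx | hx
              · exact hx
              · omega
            · have hq : (d1 == d2) = false := by simp [hbc]
              simp only [hq, Bool.false_eq_true, if_false] at hx
              exact hx
          have hle := hA2 x hx2
          rcases lt_or_eq_of_le hle with hxd | hxd
          · exact hA3 x hx2 hxd
          · subst hxd
            rcases hA5 hx2 with h2 | h2
            · exact hA6 (by omega)
            · exact absurd h2 hd
        · intro h2; omega
        · intro hx
          by_cases hbc : d1 = d2
          · exact Or.inr hbc
          · exfalso
            have hq : (d1 == d2) = false := by simp [hbc]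
            simp only [hq, Bool.false_eq_true, if_false] at hx
            have := hA2 d1 hx
            omega
        · intro h3; omega
        · intro hm
          exfalso
          have := hA2 d1 (hA1 d1 hm)
          omega
        · intro h2; omega
        · intro hbc
          have hq : (d1 == d2) = true := by simp [hbc]
          simp only [hq, if_true]
          rw [PySem.Set.mem_add]
          right; rfl

-- both cores agree on every digit list
lemma core_eq (ds : List Int) :
    checkIfTrueLoop ds PySem.Set.empty PySem.Set.empty =
      (if ds.length < 3 then false
       else if (ds.zip ds.tail).any (fun p => decide (p.1 > p.2)) then false
       else runScan 1 (ds.zip ds.tail)) := by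
  match ds with
  | [] => rfl
  | [a] => rfl
  | [a, b] => rfl
  | a :: b :: c :: r =>
    have h3 : ¬ ((a :: b :: c :: r).length < 3) := by simp
    rw [if_neg h3]
    by_cases hany : (((a :: b :: c :: r).zip (a :: b :: c :: r).tail).any (fun p => decide (p.1 > p.2))) = true
    · rw [if_pos hany]
      apply loop_false_of_bad
      intro hch
      rw [← anyDec_false_iff] at hch
      rw [hch] at hany
      exact Bool.false_ne_true hany
    · have hanyf := eq_false_of_ne_true hany
      rw [if_neg (by rw [hanyf]; exact Bool.false_ne_true)]
      have hch : List.IsChain (· ≤ ·) (a :: b :: c :: r) := (anyDec_false_iff _).mp hanyf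
      rw [List.isChain_cons_cons] at hch
      obtain ⟨hab, hch'⟩ := hch
      have hbc : b ≤ c := (List.isChain_cons_cons.mp hch').1
      have hc : (decide (a > b) || decide (b > c)) = false := by
        simp [not_lt.mpr hab, not_lt.mpr hbc]
      simp only [checkIfTrueLoop, hc, Bool.false_eq_true, if_false, List.tail_cons,
        List.zip_cons_cons]
      rw [runScan_cons]
      by_cases hab' : a = b
      · have habq : (a == b) = true := by simp [hab']
        rw [if_pos hab']
        simp only [habq, Bool.true_and, if_true]
        by_cases hbc' : b = c
        · have hbcq : (b == c) = true := by simp [hbc']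
          simp only [hbcq, if_true]
          apply main_lemma r b c _ _ 2 (by omega) hch'
          · exact fun x hx => hx
          · intro x hx; rw [PySem.Set.mem_add] at hx; rcases hx with hx | hx
            · exact (List.not_mem_nil hx).elim
            · omega
          · exact fun x hx _ => hx
          · intro _; rw [PySem.Set.mem_add]; right; omega
          · exact fun _ => Or.inl (by omega)
          · intro h; exact absurd h (by omega)
          · exact fun _ => Or.inr ⟨by omega, hbc'⟩
          · intro _ _; rw [PySem.Set.mem_add]; right; omega
          · intro _; rw [PySem.Set.mem_add]; right; omega
        · have hbcq : (b == c) = false := by simp [hbc']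
          simp only [hbcq, Bool.false_eq_true, if_false]
          apply main_lemma r b c _ _ 2 (by omega) hch'
          · intro x hx; exact (List.not_mem_nil hx).elim
          · intro x hx; rw [PySem.Set.mem_add] at hx; rcases hx with hx | hx
            · exact (List.not_mem_nil hx).elim
            · omega
          · intro x hx hlt; rw [PySem.Set.mem_add] at hx; rcases hx with hx | hx
            · exact (List.not_mem_nil hx).elim
            · exact absurd hlt (by omega)
          · intro _; rw [PySem.Set.mem_add]; right; omega
          · exact fun _ => Or.inl (by omega)
          · intro h; exact absurd h (by omega)
          · intro h; exact (List.not_mem_nil h).elim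
          · intro _ h; exact absurd h hbc'
          · intro h; exact absurd h hbc'
      · have habq : (a == b) = false := by simp [hab']
        rw [if_neg hab']
        simp only [habq, Bool.false_and, Bool.false_eq_true, if_false]
        rw [if_neg (by omega : ¬ (1 = 2))]
        apply main_lemma r b c _ _ 1 (by omega) hch'
        · intro x hx; exact (List.not_mem_nil hx).elim
        · intro x hx
          by_cases hbc' : b = c
          · have hq : (b == c) = true := by simp [hbc']
            simp only [hq, if_true] at hx
            rw [PySem.Set.mem_add] at hx
            rcases hx with hx | hx
            · exact (List.not_mem_nil hx).elim
            · omega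
          · have hq : (b == c) = false := by simp [hbc']
            simp only [hq, Bool.false_eq_true, if_false] at hx
            exact (List.not_mem_nil hx).elim
        · intro x hx hlt
          by_cases hbc' : b = c
          · have hq : (b == c) = true := by simp [hbc']
            simp only [hq, if_true] at hx
            rw [PySem.Set.mem_add] at hx
            rcases hx with hx | hx
            · exact (List.not_mem_nil hx).elim
            · exact absurd hlt (by omega)
          · have hq : (b == c) = false := by simp [hbc']
            simp only [hq, Bool.false_eq_true, if_false] at hx
            exact (List.not_mem_nil hx).elim
        · intro h; exact absurd h (by omega)
        · intro hx
          by_cases hbc' : b = c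
          · exact Or.inr hbc'
          · exfalso
            have hq : (b == c) = false := by simp [hbc']
            simp only [hq, Bool.false_eq_true, if_false] at hx
            exact (List.not_mem_nil hx).elim
        · intro h; exact absurd h (by omega)
        · intro h; exact (List.not_mem_nil h).elim
        · intro h; exact absurd h (by omega)
        · intro hbc'
          have hq : (b == c) = true := by simp [hbc']
          simp only [hq, if_true]
          rw [PySem.Set.mem_add]
          right; rfl

-- ===== VERDICT (by name: the statement is the Claim_ definition above) =====
theorem checkIfTrue_spec : Claim_equal_checkIfTrue := by
  intro val _ _
  unfold Spec_checkIfTrue checkIfTrue checkIfTrue_alt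
  cases h : pyDigits val with
  | none => rfl
  | some ds => exact core_eq ds
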